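-- pv_equiv track=rewrite | github.com/akshxl09/Programmers_quiz | python/LEVEL 1/[카카오인턴]키패드 누르기.py | solution
-- ===== SOURCE A (Python) =====
-- def solution(numbers, hand):
--     answer=''
--     left=10
--     right=12
--     for i in numbers:
--         l_cnt=0
--         r_cnt=0
--         if i==1 or i==4 or i==7:
--             answer+='L'
--             left=i
--         elif i==3 or i==6 or i==9:
--             answer+='R'
--             right=i
--         else:
--             if i==0:
--                 i=11
--             tmp=left
--             while tmp!=i:
--                 if tmp+1==i:
--                     tmp+=1
--                     l_cnt+=1
--                 elif i<tmp:
--                     tmp-=3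
--                     l_cnt+=1
--                 elif i>tmp:
--                     tmp+=3
--                     l_cnt+=1
--
--             tmp=right
--             while tmp!=i:
--                 if tmp-1==i:
--                     tmp-=1
--                     r_cnt+=1
--                 elif i<tmp:
--                     tmp-=3
--                     r_cnt+=1
--                 elif i>tmp:
--                     tmp+=3
--                     r_cnt+=1
--
--             if r_cnt > l_cnt:
--                 answer+='L'
--                 left=i
--             elif r_cnt < l_cnt:
--                 answer+='R'
--                 right=i
--             else:
--                 if hand=='left':
--                     answer+='L'
--                     left=i
--                 else:
--                     answer+='R'
--                     right=i
--     return answer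
-- ===== SOURCE B (Python) =====
-- def solution(numbers, hand):
--     pos = {d: ((d - 1) // 3, (d - 1) % 3) for d in range(1, 10)}
--     pos[0] = (3, 1)
--     left, right = (3, 0), (3, 2)
--     out = []
--     for n in numbers:
--         r, c = pos[n]
--         if c == 0:
--             out.append('L')
--             left = (r, c)
--         elif c == 2:
--             out.append('R')
--             right = (r, c)
--         else:
--             dl = abs(left[0] - r) + abs(left[1] - c)
--             dr = abs(right[0] - r) + abs(right[1] - c)
--             if dl < dr or (dl == dr and hand == 'left'):
--                 out.append('L')
--                 left = (r, c)
--             else: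
--                 out.append('R')
--                 right = (r, c)
--     return ''.join(out)
-- ===== Notes on version B (the rewrite author's own statement) =====
-- stated objective: simpler
-- what changed: Replaces the two hand-stepping while loops (walking key numbers by +-3/+-1) with a grid coordinate map and a closed-form Manhattan distance, collecting the answer in a list joined at the end.
-- outside the precondition, e.g. on solution([11], 'right'): A returns 'R', B raises KeyError
import Mathlib
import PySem

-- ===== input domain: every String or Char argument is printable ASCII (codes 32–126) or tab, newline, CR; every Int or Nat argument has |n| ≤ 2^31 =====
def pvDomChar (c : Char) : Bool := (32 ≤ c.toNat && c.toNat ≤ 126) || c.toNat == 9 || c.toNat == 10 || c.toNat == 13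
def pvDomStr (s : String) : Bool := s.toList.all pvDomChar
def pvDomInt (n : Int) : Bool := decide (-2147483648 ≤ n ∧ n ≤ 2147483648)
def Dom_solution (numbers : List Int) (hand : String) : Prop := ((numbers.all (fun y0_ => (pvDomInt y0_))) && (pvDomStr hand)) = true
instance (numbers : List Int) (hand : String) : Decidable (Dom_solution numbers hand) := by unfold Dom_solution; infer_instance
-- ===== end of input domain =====

-- B replaces A's key-number stepping while-loops with a coordinate map and closed-form
-- Manhattan distances (objective: simpler); equivalence is proved for keypad inputs (digits 0-9).


-- ===== PORT A =====
-- A's first while loop (left thumb walk); fuel only makes it total — under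
-- Pre_solution every run terminates well within the fuel.
def aStepL (fuel : Nat) (tmp i cnt : Int) : Int :=
  match fuel with
  | 0 => cnt
  | fuel + 1 =>
    if tmp = i then cnt
    else if tmp + 1 = i then aStepL fuel (tmp + 1) i (cnt + 1)
    else if i < tmp then aStepL fuel (tmp - 3) i (cnt + 1)
    else aStepL fuel (tmp + 3) i (cnt + 1)

-- A's second while loop (right thumb walk)
def aStepR (fuel : Nat) (tmp i cnt : Int) : Int :=
  match fuel with
  | 0 => cnt
  | fuel + 1 =>
    if tmp = i then cnt
    else if tmp - 1 = i then aStepR fuel (tmp - 1) i (cnt + 1)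
    else if i < tmp then aStepR fuel (tmp - 3) i (cnt + 1)
    else aStepR fuel (tmp + 3) i (cnt + 1)

def aLoop (hand : String) (numbers : List Int) (left right : Int) (answer : String) : String :=
  match numbers with
  | [] => answer
  | i :: rest =>
    if i = 1 ∨ i = 4 ∨ i = 7 then aLoop hand rest i right (answer ++ "L")
    else if i = 3 ∨ i = 6 ∨ i = 9 then aLoop hand rest left i (answer ++ "R")
    else
      let i' := if i = 0 then 11 else i
      -- fuel (|tmp - i| + 1) bounds the iterations of any terminating run of the while loop
      let l_cnt := aStepL ((left - i').natAbs + 1) left i' 0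
      let r_cnt := aStepR ((right - i').natAbs + 1) right i' 0
      if r_cnt > l_cnt then aLoop hand rest i' right (answer ++ "L")
      else if r_cnt < l_cnt then aLoop hand rest left i' (answer ++ "R")
      else if hand = "left" then aLoop hand rest i' right (answer ++ "L")
      else aLoop hand rest left i' (answer ++ "R")

def solution (numbers : List Int) (hand : String) : String :=
  aLoop hand numbers 10 12 ""

-- ===== PORT B =====
-- the dict comprehension {d: ((d-1)//3,(d-1)%3) for d in range(1,10)} plus pos[0]=(3,1)
def bPos : PySem.Dict Int (Int × Int) :=
  ((PySem.List.pyRange 1 10 1).foldl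
    (fun d k => d.insert k (PySem.Int.floordiv (k - 1) 3, PySem.Int.mod (k - 1) 3))
    (PySem.Dict.empty : PySem.Dict Int (Int × Int))).insert 0 (3, 1)

def bLoop (hand : String) (numbers : List Int) (left right : Int × Int) (out : List String) : List String :=
  match numbers with
  | [] => out
  | n :: rest =>
    match bPos.get? n with
    | none => out   -- KeyError in Python; outside Pre_solution
    | some (r, c) =>
      if c = 0 then bLoop hand rest (r, c) right (out ++ ["L"])
      else if c = 2 then bLoop hand rest left (r, c) (out ++ ["R"])
      else
        let dl := |left.1 - r| + |left.2 - c|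
        let dr := |right.1 - r| + |right.2 - c|
        if dl < dr ∨ (dl = dr ∧ hand = "left") then bLoop hand rest (r, c) right (out ++ ["L"])
        else bLoop hand rest left (r, c) (out ++ ["R"])

def solution_alt (numbers : List Int) (hand : String) : String :=
  String.join (bLoop hand numbers (3, 0) (3, 2) [])

-- ===== PRECONDITION & SPEC =====
-- Pre_ restricts to the keypad's natural domain (digits 0-9): on other ints A's while
-- loops mostly diverge (e.g. 10, 12, 13) and B raises KeyError; on the few out-of-range
-- ints where A still returns (e.g. 11, A's internal alias for the 0 key) B raises KeyError.
def Pre_solution (numbers : List Int) (hand : String) : Prop :=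
  ∀ n ∈ numbers, 0 ≤ n ∧ n ≤ 9
instance (numbers : List Int) (hand : String) : Decidable (Pre_solution numbers hand) := by
  unfold Pre_solution; infer_instance
def pvWitness_solution : List Int × String := ([1, 3, 4, 5, 8, 2, 1, 4, 5, 9, 5], "right")

def Spec_solution (numbers : List Int) (hand : String) (out : String) : Prop := out = solution_alt numbers hand
instance (numbers : List Int) (hand : String) (out : String) : Decidable (Spec_solution numbers hand out) := by unfold Spec_solution; infer_instance

-- ===== CLAIM (what is proved, stated in full; the proofs are below) =====
def Claim_equal_solution : Prop := ∀ (numbers : List Int) (hand : String), Dom_solution numbers hand → Pre_solution numbers hand → Spec_solution numbers hand (solution numbers hand)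

-- ===== LEMMAS AND PROOFS =====

-- coordinates of A's key numbers (1-9 grid keys, 10='*', 11=0 key, 12='#')
def coordA (k : Int) : Int × Int :=
  if k = 10 then (3, 0) else if k = 11 then (3, 1) else if k = 12 then (3, 2)
  else (PySem.Int.floordiv (k - 1) 3, PySem.Int.mod (k - 1) 3)

def mdist (p q : Int × Int) : Int := |p.1 - q.1| + |p.2 - q.2|

-- the reachable states
def leftKeys : List Int := [10, 1, 4, 7, 2, 5, 8, 11]
def rightKeys : List Int := [12, 3, 6, 9, 2, 5, 8, 11]
def midKeys : List Int := [2, 5, 8, 11]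

lemma stepL_eq_mdist :
    ∀ l ∈ leftKeys, ∀ t ∈ midKeys, aStepL ((l - t).natAbs + 1) l t 0 = mdist (coordA l) (coordA t) := by
  decide

lemma stepR_eq_mdist :
    ∀ r ∈ rightKeys, ∀ t ∈ midKeys, aStepR ((r - t).natAbs + 1) r t 0 = mdist (coordA r) (coordA t) := by
  decide

lemma join_snoc (l : List String) (s : String) :
    String.join (l ++ [s]) = String.join l ++ s := by
  simp [String.join]

lemma mid_step (hand : String) (rest : List Int) (left right : Int) (out : List String) (t : Int)
    (ht : t ∈ midKeys) (hL : left ∈ leftKeys) (hR : right ∈ rightKeys)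
    (IH : ∀ (l r : Int) (o : List String), l ∈ leftKeys → r ∈ rightKeys →
        aLoop hand rest l r (String.join o) = String.join (bLoop hand rest (coordA l) (coordA r) o)) :
    (if aStepL ((left - t).natAbs + 1) left t 0 < aStepR ((right - t).natAbs + 1) right t 0 then aLoop hand rest t right (String.join out ++ "L")
     else if aStepR ((right - t).natAbs + 1) right t 0 < aStepL ((left - t).natAbs + 1) left t 0 then aLoop hand rest left t (String.join out ++ "R")
     else if hand = "left" then aLoop hand rest t right (String.join out ++ "L")
     else aLoop hand rest left t (String.join out ++ "R"))
    =
    String.join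
      (if |(coordA left).1 - (coordA t).1| + |(coordA left).2 - (coordA t).2| <
          |(coordA right).1 - (coordA t).1| + |(coordA right).2 - (coordA t).2| ∨
         (|(coordA left).1 - (coordA t).1| + |(coordA left).2 - (coordA t).2| =
          |(coordA right).1 - (coordA t).1| + |(coordA right).2 - (coordA t).2| ∧ hand = "left")
       then bLoop hand rest (coordA t) (coordA right) (out ++ ["L"])
       else bLoop hand rest (coordA left) (coordA t) (out ++ ["R"])) := by
  have htL : t ∈ leftKeys := by fin_cases ht <;> decide
  have htR : t ∈ rightKeys := by fin_cases ht <;> decide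
  rw [stepL_eq_mdist left hL t ht, stepR_eq_mdist right hR t ht]
  have hl := IH t right (out ++ ["L"]) htL hR
  have hr := IH left t (out ++ ["R"]) hL htR
  rw [join_snoc] at hl hr
  unfold mdist
  rw [apply_ite String.join]
  obtain ⟨da, hda⟩ : ∃ x, |(coordA left).1 - (coordA t).1| + |(coordA left).2 - (coordA t).2| = x := ⟨_, rfl⟩
  obtain ⟨db, hdb⟩ : ∃ x, |(coordA right).1 - (coordA t).1| + |(coordA right).2 - (coordA t).2| = x := ⟨_, rfl⟩
  rw [hda, hdb]
  by_cases hh : hand = "left"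
  · simp only [hh] at hl hr ⊢
    split_ifs with h1 h2 h3 <;>
      first
        | exact hl
        | exact hr
        | (exfalso; simp_all <;> omega)
  · simp only [hh] at hl hr ⊢
    split_ifs with h1 h2 h3 <;>
      first
        | exact hl
        | exact hr
        | (exfalso; simp_all <;> omega)

lemma loop_eq (numbers : List Int) (hand : String) :
    ∀ (left right : Int) (out : List String),
      (∀ n ∈ numbers, 0 ≤ n ∧ n ≤ 9) →
      left ∈ leftKeys → right ∈ rightKeys →
      aLoop hand numbers left right (String.join out)
        = String.join (bLoop hand numbers (coordA left) (coordA right) out) := by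
  induction numbers with
  | nil => intro _ _ _ _ _ _; simp [aLoop, bLoop]
  | cons n rest ih =>
    intro left right out hpre hL hR
    have hn := hpre n (List.mem_cons_self)
    have hrest : ∀ m ∈ rest, 0 ≤ m ∧ m ≤ 9 := fun m hm => hpre m (List.mem_cons_of_mem _ hm)
    have ih' : ∀ (l r : Int) (o : List String), l ∈ leftKeys → r ∈ rightKeys →
        aLoop hand rest l r (String.join o) = String.join (bLoop hand rest (coordA l) (coordA r) o) :=
      fun l r o => ih l r o hrest
    obtain ⟨h0, h9⟩ := hn
    interval_cases n
    · simp only [aLoop, bLoop, show bPos.get? 0 = some ((3 : Int), (1 : Int)) by decide,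
        show ((0 : Int) = 1 ∨ (0 : Int) = 4 ∨ (0 : Int) = 7) = False by decide,
        show ((0 : Int) = 3 ∨ (0 : Int) = 6 ∨ (0 : Int) = 9) = False by decide,
        show ((0 : Int) = 0) = True by decide,
        show ((1 : Int) = 0) = False by decide,
        show ((1 : Int) = 2) = False by decide,
        if_false, if_true, ite_false, ite_true]
      exact mid_step hand rest left right out 11 (by decide) hL hR ih'
    · simp only [aLoop, bLoop, show bPos.get? 1 = some ((0 : Int), (0 : Int)) by decide]
      norm_num
      rw [← join_snoc]
      exact ih' 1 right (out ++ ["L"]) (by decide) hR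
    · simp only [aLoop, bLoop, show bPos.get? 2 = some ((0 : Int), (1 : Int)) by decide,
        show ((2 : Int) = 1 ∨ (2 : Int) = 4 ∨ (2 : Int) = 7) = False by decide,
        show ((2 : Int) = 3 ∨ (2 : Int) = 6 ∨ (2 : Int) = 9) = False by decide,
        show ((2 : Int) = 0) = False by decide,
        show ((1 : Int) = 0) = False by decide,
        show ((1 : Int) = 2) = False by decide,
        if_false, if_true, ite_false, ite_true]
      exact mid_step hand rest left right out 2 (by decide) hL hR ih'
    · simp only [aLoop, bLoop, show bPos.get? 3 = some ((0 : Int), (2 : Int)) by decide]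
      norm_num
      rw [← join_snoc]
      exact ih' left 3 (out ++ ["R"]) hL (by decide)
    · simp only [aLoop, bLoop, show bPos.get? 4 = some ((1 : Int), (0 : Int)) by decide]
      norm_num
      rw [← join_snoc]
      exact ih' 4 right (out ++ ["L"]) (by decide) hR
    · simp only [aLoop, bLoop, show bPos.get? 5 = some ((1 : Int), (1 : Int)) by decide,
        show ((5 : Int) = 1 ∨ (5 : Int) = 4 ∨ (5 : Int) = 7) = False by decide,
        show ((5 : Int) = 3 ∨ (5 : Int) = 6 ∨ (5 : Int) = 9) = False by decide,
        show ((5 : Int) = 0) = False by decide,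
        show ((1 : Int) = 0) = False by decide,
        show ((1 : Int) = 2) = False by decide,
        if_false, if_true, ite_false, ite_true]
      exact mid_step hand rest left right out 5 (by decide) hL hR ih'
    · simp only [aLoop, bLoop, show bPos.get? 6 = some ((1 : Int), (2 : Int)) by decide]
      norm_num
      rw [← join_snoc]
      exact ih' left 6 (out ++ ["R"]) hL (by decide)
    · simp only [aLoop, bLoop, show bPos.get? 7 = some ((2 : Int), (0 : Int)) by decide]
      norm_num
      rw [← join_snoc]
      exact ih' 7 right (out ++ ["L"]) (by decide) hR
    · simp only [aLoop, bLoop, show bPos.get? 8 = some ((2 : Int), (1 : Int)) by decide,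
        show ((8 : Int) = 1 ∨ (8 : Int) = 4 ∨ (8 : Int) = 7) = False by decide,
        show ((8 : Int) = 3 ∨ (8 : Int) = 6 ∨ (8 : Int) = 9) = False by decide,
        show ((8 : Int) = 0) = False by decide,
        show ((1 : Int) = 0) = False by decide,
        show ((1 : Int) = 2) = False by decide,
        if_false, if_true, ite_false, ite_true]
      exact mid_step hand rest left right out 8 (by decide) hL hR ih'
    · simp only [aLoop, bLoop, show bPos.get? 9 = some ((2 : Int), (2 : Int)) by decide]
      norm_num
      rw [← join_snoc]
      exact ih' left 9 (out ++ ["R"]) hL (by decide)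

-- ===== VERDICT (by name: the statement is the Claim_ definition above) =====
theorem solution_spec : Claim_equal_solution := by
  intro numbers hand _ hpre
  unfold Spec_solution solution solution_alt
  have h := loop_eq numbers hand 10 12 [] hpre (by decide) (by decide)
  simpa [String.join, coordA] using h
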